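-- pv_equiv track=rewrite | github.com/kreuzhofer/dgx-manager-fine-tune-recipes | scripts/evaluate_build123d_exec.py | first_messages
-- ===== SOURCE A (Python) =====
-- def first_messages(messages: list) -> tuple[str, str]:
--     """Return (system_content, first_user_content). Multi-turn convos are
--     collapsed to single-turn at the eval boundary."""
--     sys_msg = ""
--     user_msg = ""
--     for m in messages or []:
--         role = m.get("role")
--         if role == "system" and not sys_msg:
--             sys_msg = m.get("content") or ""
--         elif role == "user" and not user_msg:
--             user_msg = m.get("content") or ""
--             break
--     return sys_msg, user_msg
-- ===== SOURCE B (Python) =====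
-- def first_messages(messages: list) -> tuple[str, str]:
--     """Return (system_content, first_user_content). Multi-turn convos are
--     collapsed to single-turn at the eval boundary."""
--     msgs = messages or []
--     u = next((i for i, m in enumerate(msgs) if m.get("role") == "user"), len(msgs))
--     user_msg = (msgs[u].get("content") or "") if u < len(msgs) else ""
--     sys_msg = next((m.get("content") for m in msgs[:u]
--                     if m.get("role") == "system" and m.get("content")), "")
--     return sys_msg, user_msg
-- ===== Notes on version B (the rewrite author's own statement) =====
-- stated objective: alternative
-- what changed: Replaces A's single fused break-loop carrying two mutable accumulators by an index-first decomposition: find the first-user index u, take that message's content, then search only messages[:u] for the first system message with truthy content.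
import Mathlib
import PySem

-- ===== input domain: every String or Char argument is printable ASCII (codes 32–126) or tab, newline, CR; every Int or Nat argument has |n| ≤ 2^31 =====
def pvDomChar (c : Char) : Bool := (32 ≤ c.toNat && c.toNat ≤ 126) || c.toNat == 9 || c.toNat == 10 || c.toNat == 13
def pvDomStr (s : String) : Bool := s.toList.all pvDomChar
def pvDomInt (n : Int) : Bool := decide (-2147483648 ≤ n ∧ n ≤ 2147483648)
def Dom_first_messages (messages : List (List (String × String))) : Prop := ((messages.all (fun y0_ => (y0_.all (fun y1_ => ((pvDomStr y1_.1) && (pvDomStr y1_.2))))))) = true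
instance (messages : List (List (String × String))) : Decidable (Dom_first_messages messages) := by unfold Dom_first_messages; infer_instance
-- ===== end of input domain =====

-- B genuinely restructures A (index-first decomposition instead of a fused break-loop); behaviour is identical.

-- shared helper: Python dict.get on an insertion-order association list (first match)
def pvGetMsg (m : List (String × String)) (k : String) : Option String :=
  match m with
  | [] => none
  | (a, b) :: rest => if a = k then some b else pvGetMsg rest k

-- ===== PORT A =====
-- A's loop: two accumulators, break on the first user message.
def first_messages_go (msgs : List (List (String × String))) (sysMsg userMsg : String) : String × String :=
  match msgs with
  | [] => (sysMsg, userMsg)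
  | m :: rest =>
    let role := pvGetMsg m "role"
    if role = some "system" ∧ sysMsg = "" then
      first_messages_go rest ((pvGetMsg m "content").getD "") userMsg
    else if role = some "user" ∧ userMsg = "" then
      (sysMsg, (pvGetMsg m "content").getD "")        -- break
    else
      first_messages_go rest sysMsg userMsg

def first_messages (messages : List (List (String × String))) : String × String :=
  first_messages_go messages "" ""

-- ===== PORT B =====
def first_messages_alt (messages : List (List (String × String))) : String × String :=
  let u := messages.findIdx (fun m => pvGetMsg m "role" == some "user")
  let userMsg := if h : u < messages.length then (pvGetMsg messages[u] "content").getD "" else ""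
  let sysMsg :=
    match (messages.take u).find? (fun m => pvGetMsg m "role" == some "system" && (pvGetMsg m "content").getD "" != "") with
    | some m => (pvGetMsg m "content").getD ""
    | none => ""
  (sysMsg, userMsg)

-- ===== PRECONDITION & SPEC =====
def Spec_first_messages (messages : List (List (String × String))) (out : String × String) : Prop := out = first_messages_alt messages
instance (messages : List (List (String × String))) (out : String × String) : Decidable (Spec_first_messages messages out) := by unfold Spec_first_messages; infer_instance

-- ===== CLAIM (what is proved, stated in full; the proofs are below) =====
def Claim_equal_first_messages : Prop := ∀ (messages : List (List (String × String))), Dom_first_messages messages → Spec_first_messages messages (first_messages messages)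

-- ===== LEMMAS AND PROOFS =====

-- proof-only recursive characterisation of B
def altRec : List (List (String × String)) → String × String
  | [] => ("", "")
  | m :: rest =>
    if pvGetMsg m "role" = some "user" then
      ("", (pvGetMsg m "content").getD "")
    else if pvGetMsg m "role" = some "system" ∧ (pvGetMsg m "content").getD "" ≠ "" then
      ((pvGetMsg m "content").getD "", (altRec rest).2)
    else
      altRec rest

lemma alt_eq_altRec (msgs : List (List (String × String))) :
    first_messages_alt msgs = altRec msgs := by
  induction msgs with
  | nil => rfl
  | cons m rest ih =>
    by_cases hu : pvGetMsg m "role" = some "user"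
    · have hub : (pvGetMsg m "role" == some "user") = true := by simpa using hu
      simp only [first_messages_alt, altRec, List.findIdx_cons, hub, cond_true, if_pos hu,
        List.take_zero, List.find?_nil, List.length_cons, List.getElem_cons_zero]
      rw [dif_pos (Nat.succ_pos _)]
    · have hub : (pvGetMsg m "role" == some "user") = false := by simpa using hu
      simp only [first_messages_alt, altRec, List.findIdx_cons, hub, cond_false, if_neg hu,
        List.take_succ_cons, List.find?_cons, List.length_cons, Nat.add_lt_add_iff_right,
        List.getElem_cons_succ]
      by_cases hs : pvGetMsg m "role" = some "system" ∧ (pvGetMsg m "content").getD "" ≠ ""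
      · have hb : (pvGetMsg m "role" == some "system" && (pvGetMsg m "content").getD "" != "") = true := by
          simp [hs.1, bne_iff_ne, hs.2]
        rw [hb, if_pos hs]
        simp only [first_messages_alt] at ih
        exact congrArg (Prod.mk _) (congrArg Prod.snd ih)
      · have hb : (pvGetMsg m "role" == some "system" && (pvGetMsg m "content").getD "" != "") = false := by
          by_cases h1 : pvGetMsg m "role" = some "system"
          · have hc : (pvGetMsg m "content").getD "" = "" := by
              by_contra hc; exact hs ⟨h1, hc⟩
            simp [hc]
          · simp [h1]
        rw [hb, if_neg hs]
        exact ih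

lemma go_eq (msgs : List (List (String × String))) (s : String) :
    first_messages_go msgs s "" =
      ((if s = "" then (altRec msgs).1 else s), (altRec msgs).2) := by
  induction msgs generalizing s with
  | nil => simp [first_messages_go, altRec]
  | cons m rest ih =>
    show (if pvGetMsg m "role" = some "system" ∧ s = "" then
            first_messages_go rest ((pvGetMsg m "content").getD "") ""
          else if pvGetMsg m "role" = some "user" ∧ ("" : String) = "" then
            (s, (pvGetMsg m "content").getD "")
          else first_messages_go rest s "") = _
    simp only [altRec]
    by_cases h1 : pvGetMsg m "role" = some "system" ∧ s = ""
    · have hu : ¬ pvGetMsg m "role" = some "user" := by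
        rw [h1.1]; intro h; simp at h
      rw [if_pos h1, if_neg hu, ih]
      by_cases hc : (pvGetMsg m "content").getD "" = ""
      · simp [hc, h1.1, h1.2]
      · simp [hc, h1.1, h1.2]
    · rw [if_neg h1]
      by_cases hu : pvGetMsg m "role" = some "user"
      · have hs : ¬ (pvGetMsg m "role" = some "system" ∧ (pvGetMsg m "content").getD "" ≠ "") := by
          rw [hu]; intro h; simp at h
        rw [if_pos ⟨hu, trivial⟩, if_pos hu]
        by_cases hse : s = "" <;> simp [hse]
      · rw [if_neg (fun h => hu h.1), if_neg hu, ih]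
        by_cases hs : pvGetMsg m "role" = some "system" ∧ (pvGetMsg m "content").getD "" ≠ ""
        · have hsne : ¬ s = "" := fun h => h1 ⟨hs.1, h⟩
          simp [hs, hsne]
        · rw [if_neg hs]

-- ===== VERDICT (by name: the statement is the Claim_ definition above) =====
theorem first_messages_spec : Claim_equal_first_messages := by
  intro messages _
  unfold Spec_first_messages first_messages
  rw [go_eq, alt_eq_altRec]
  simp
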